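-- pv_equiv track=rewrite | github.com/mackowia/untitled | zjazd_II/dzień_2/ex_2_1_1.py | wiecej_niz
-- ===== SOURCE A (Python) =====
-- def wiecej_niz(napis, liczba):
--     ilosc_wystapien = {}
--     for litera in napis:
--         ilosc_wystapien[litera]= ilosc_wystapien.get(litera, 0) + 1
--
--     wybrane = set()
--     for litera, wystapienia in ilosc_wystapien.items():
--         if wystapienia > liczba:
--             wybrane.add(litera)
--     return wybrane
-- ===== SOURCE B (Python) =====
-- def wiecej_niz(napis, liczba):
--     # Peel-off strategy: repeatedly take the first remaining character, strip
--     # all its occurrences in one filtering pass (the drop in length IS its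
--     # count), and keep it if that count exceeds liczba.  No frequency table,
--     # no per-character rescans of the original string.
--     wybrane = set()
--     pozostale = list(napis)
--     while pozostale:
--         litera = pozostale[0]
--         reszta = [x for x in pozostale if x != litera]
--         if len(pozostale) - len(reszta) > liczba:
--             wybrane.add(litera)
--         pozostale = reszta
--     return wybrane
-- ===== Notes on version B (the rewrite author's own statement) =====
-- stated objective: alternative
-- what changed: Replaces A's build-frequency-dict-then-filter two-pass algorithm by a peel-off loop: repeatedly take the first remaining character, remove all its occurrences with one filtering pass, read its count off the length drop, and keep it if the count exceeds liczba; no frequency table and no items() pass exist.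
import Mathlib
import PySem

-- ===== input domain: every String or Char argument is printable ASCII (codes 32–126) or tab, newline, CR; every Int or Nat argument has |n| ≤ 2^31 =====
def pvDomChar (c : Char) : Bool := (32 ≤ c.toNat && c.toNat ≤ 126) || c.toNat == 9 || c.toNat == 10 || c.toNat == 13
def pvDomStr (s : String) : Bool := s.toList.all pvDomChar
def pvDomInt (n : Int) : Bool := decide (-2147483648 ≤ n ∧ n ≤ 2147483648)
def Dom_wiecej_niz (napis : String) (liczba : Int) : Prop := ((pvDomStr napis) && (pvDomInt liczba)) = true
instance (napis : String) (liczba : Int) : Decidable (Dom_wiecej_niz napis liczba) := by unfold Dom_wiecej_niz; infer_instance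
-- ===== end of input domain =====

-- B replaces A's frequency-dict-then-filter two passes by a peel-off loop: repeatedly take the
-- first remaining character, strip all its occurrences in one filtering pass (the length drop is
-- its count) and keep it if that count exceeds liczba (alternative decomposition; same value, different traversal).

-- ===== PORT A =====
def wiecej_niz (napis : String) (liczba : Int) : List String :=
  let ilosc_wystapien : PySem.Dict Char Int :=
    napis.toList.foldl (fun d litera => d.insert litera (d.getD litera 0 + 1)) PySem.Dict.empty
  ilosc_wystapien.items.foldl
    (fun wybrane p => if p.2 > liczba then PySem.Set.add wybrane (String.ofList [p.1]) else wybrane)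
    PySem.Set.empty

-- ===== PORT B =====
-- the while-loop of Source B as structural recursion on the shrinking list 'pozostale'
def wnLoop (liczba : Int) (wybrane : PySem.Set String) (pozostale : List Char) : PySem.Set String :=
  match pozostale with
  | [] => wybrane
  | litera :: t =>
    let reszta := (litera :: t).filter (fun x => x ≠ litera)
    let wybrane' :=
      if (((litera :: t).length : Int) - (reszta.length : Int)) > liczba then
        PySem.Set.add wybrane (String.ofList [litera])
      else wybrane
    wnLoop liczba wybrane' reszta
termination_by pozostale.length
decreasing_by
  have h : ((litera :: t).filter (fun x => decide (x ≠ litera))) = t.filter (fun x => decide (x ≠ litera)) := by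
    simp
  simp only [h, List.length_cons]
  exact Nat.lt_succ_of_le (List.length_filter_le _ t)

def wiecej_niz_alt (napis : String) (liczba : Int) : List String :=
  wnLoop liczba PySem.Set.empty napis.toList

-- ===== PRECONDITION & SPEC =====
def Spec_wiecej_niz (napis : String) (liczba : Int) (out : List String) : Prop := out = wiecej_niz_alt napis liczba
instance (napis : String) (liczba : Int) (out : List String) : Decidable (Spec_wiecej_niz napis liczba out) := by unfold Spec_wiecej_niz; infer_instance

-- ===== CLAIM =====
def Claim_equal_wiecej_niz : Prop := ∀ (napis : String) (liczba : Int), Dom_wiecej_niz napis liczba → Spec_wiecej_niz napis liczba (wiecej_niz napis liczba)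

-- ===== LEMMAS AND PROOFS =====

lemma pv_single_inj (a b : Char) (h : String.ofList [a] = String.ofList [b]) : a = b := by
  have := congrArg String.toList h
  simpa using this

-- removing every occurrence of c drops the length by exactly count c
lemma pv_len_filter (t : List Char) (c : Char) :
    (t.filter (fun x => decide (x ≠ c))).length + t.count c = t.length := by
  induction t with
  | nil => simp
  | cons h t ih =>
    by_cases hc : h = c
    · subst hc
      simp [List.count_cons_self] at ih ⊢
      omega
    · simp [hc, List.count_cons_of_ne hc] at ih ⊢
      omega

-- dedup commutes with filter
lemma pv_ofList_filter (p : Char → Bool) :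
    ∀ (xs : List Char), (PySem.Set.ofList xs).filter p = PySem.Set.ofList (xs.filter p) := by
  intro xs
  induction xs with
  | nil => simp [PySem.Set.ofList_nil]
  | cons x xs ih =>
    rw [PySem.Set.ofList_cons]
    cases hp : p x with
    | true =>
      rw [List.filter_cons_of_pos hp, List.filter_cons_of_pos hp, PySem.Set.ofList_cons, ← ih]
      simp only [PySem.Set.discard, List.filter_filter]
      congr 1
      exact List.filter_congr (fun a _ => Bool.and_comm _ _)
    | false =>
      rw [List.filter_cons_of_neg (by simp [hp]), List.filter_cons_of_neg (by simp [hp]), ← ih]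
      simp only [PySem.Set.discard, List.filter_filter]
      exact List.filter_congr (fun a _ => by by_cases hax : a = x <;> simp [hax, hp])

-- foldl of a conditional Set.add over a nodup char list whose images are fresh w.r.t. acc
lemma pv_foldl_add_if (q : Char → Prop) [DecidablePred q] :
    ∀ (l : List Char) (acc : List String), l.Nodup →
      (∀ c ∈ l, String.ofList [c] ∉ acc) →
      l.foldl (fun w k => if q k then PySem.Set.add w (String.ofList [k]) else w) acc
        = acc ++ (l.filter (fun k => decide (q k))).map (fun k => String.ofList [k]) := by
  intro l
  induction l with
  | nil => intro acc _ _; simp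
  | cons c l ih =>
    intro acc hnd hfresh
    have hndl : l.Nodup := hnd.of_cons
    have hcl : c ∉ l := (List.nodup_cons.mp hnd).1
    by_cases hq : q c
    · have hnew : ∀ c' ∈ l, String.ofList [c'] ∉ acc ++ [String.ofList [c]] := by
        intro c' hc'
        simp only [List.mem_append, List.mem_singleton]
        rintro (h | h)
        · exact hfresh c' (List.mem_cons_of_mem _ hc') h
        · exact hcl (pv_single_inj c' c h ▸ hc')
      have hadd : PySem.Set.add acc (String.ofList [c]) = acc ++ [String.ofList [c]] :=
        PySem.Set.add_of_not_mem (hfresh c List.mem_cons_self)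
      simp only [List.foldl_cons, if_pos hq, hadd]
      rw [ih (acc ++ [String.ofList [c]]) hndl hnew]
      simp [hq]
    · simp only [List.foldl_cons, if_neg hq]
      rw [ih acc hndl (fun c' hc' => hfresh c' (List.mem_cons_of_mem _ hc'))]
      simp [hq]

-- canonical form of B's peel-off loop
lemma pv_wnLoop_eq (liczba : Int) :
    ∀ (acc : List String) (s : List Char),
      (∀ c ∈ s, String.ofList [c] ∉ acc) →
      wnLoop liczba acc s
        = acc ++ ((PySem.Set.ofList s).filter
            (fun k => decide ((s.count k : Int) > liczba))).map (fun k => String.ofList [k]) := by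
  intro acc s
  induction acc, s using wnLoop.induct (liczba := liczba) with
  | case1 wybrane => intro _; simp [wnLoop, PySem.Set.ofList_nil]
  | case2 wybrane litera t reszta wybrane' ih =>
    intro hfresh
    have hr : List.filter (fun x => decide (x ≠ litera)) (litera :: t)
        = t.filter (fun x => decide (x ≠ litera)) := by simp
    have h1 : reszta = t.filter (fun x => decide (x ≠ litera)) := hr
    have hlen : (t.filter (fun x => decide (x ≠ litera))).length + t.count litera = t.length :=
      pv_len_filter t litera
    -- the loop's test equals "count litera > liczba"
    have hcond : ((((litera :: t).length : Int) - ((reszta.length : Int))) > liczba)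
        ↔ (((litera :: t).count litera : Int) > liczba) := by
      rw [h1]
      simp only [List.length_cons, List.count_cons_self]
      push_cast
      omega
    -- the deduped tail: ofList (litera :: t) = litera :: ofList reszta
    have hdedup : PySem.Set.ofList (litera :: t) = litera :: PySem.Set.ofList reszta := by
      rw [PySem.Set.ofList_cons]
      congr 1
      have hd : (PySem.Set.ofList t).discard litera
          = (PySem.Set.ofList t).filter (fun x => decide (x ≠ litera)) := by
        simp only [PySem.Set.discard]
        exact List.filter_congr (fun a _ => by by_cases hax : a = litera <;> simp [hax])
      rw [hd, pv_ofList_filter, h1]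
    -- counts inside reszta agree with counts in litera :: t
    have hcnt : ∀ k ∈ PySem.Set.ofList reszta, (litera :: t).count k = reszta.count k := by
      intro k hk
      have hkr : k ∈ reszta := (PySem.Set.mem_ofList _ _).1 hk
      rw [h1] at hkr
      have hkne : k ≠ litera := by
        have := List.of_mem_filter hkr
        simpa using this
      rw [List.count_cons_of_ne (Ne.symm hkne), h1]
      exact (List.count_filter (by simp [hkne])).symm
    have hstep : wnLoop liczba wybrane (litera :: t) = wnLoop liczba wybrane' reszta := by
      rw [wnLoop]
      rfl
    rw [hstep, hdedup, List.filter_cons]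
    by_cases hQ : (((litera :: t).count litera : Int) > liczba)
    · have hQ' : ((((litera :: t).length : Int) - ((reszta.length : Int))) > liczba) :=
        hcond.2 hQ
      have h2 : wybrane' = PySem.Set.add wybrane (String.ofList [litera]) := dif_pos hQ'
      have hadd : PySem.Set.add wybrane (String.ofList [litera])
          = wybrane ++ [String.ofList [litera]] :=
        PySem.Set.add_of_not_mem (hfresh litera List.mem_cons_self)
      have hfresh' : ∀ c ∈ reszta, String.ofList [c] ∉ wybrane' := by
        intro c hc
        rw [h1] at hc
        have hct : c ∈ t := List.mem_of_mem_filter hc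
        have hcne : c ≠ litera := by
          have := List.of_mem_filter hc; simpa using this
        rw [h2, hadd]
        simp only [List.mem_append, List.mem_singleton]
        rintro (h | h)
        · exact hfresh c (List.mem_cons_of_mem _ hct) h
        · exact hcne (pv_single_inj c litera h)
      rw [ih hfresh', h2, hadd]
      have hhead : (decide (((litera :: t).count litera : Int) > liczba)) = true := by
        simpa using hQ
      simp only [hhead, List.append_assoc, List.singleton_append]
      congr 3
      exact List.filter_congr (fun k hk => by rw [hcnt k hk])
    · have hQ' : ¬ ((((litera :: t).length : Int) - ((reszta.length : Int))) > liczba) :=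
        fun h => hQ (hcond.1 h)
      have h2 : wybrane' = wybrane := dif_neg hQ'
      have hfresh' : ∀ c ∈ reszta, String.ofList [c] ∉ wybrane' := by
        intro c hc
        rw [h1] at hc
        rw [h2]
        exact hfresh c (List.mem_cons_of_mem _ (List.mem_of_mem_filter hc))
      rw [ih hfresh', h2]
      have hhead : (decide (((litera :: t).count litera : Int) > liczba)) = false := by
        simpa using hQ
      simp only [hhead, Bool.false_eq_true, if_false]
      congr 2
      exact List.filter_congr (fun k hk => by rw [hcnt k hk])

lemma pv_main (napis : String) (liczba : Int) :
    wiecej_niz napis liczba = wiecej_niz_alt napis liczba := by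
  simp only [wiecej_niz, wiecej_niz_alt]
  rw [PySem.Dict.foldl_insert_getD_add_one_eq_counter, PySem.Dict.items_counter, List.foldl_map,
    pv_wnLoop_eq liczba PySem.Set.empty napis.toList (by intro c _ h; simp [PySem.Set.empty] at h)]
  exact pv_foldl_add_if (fun k => ((napis.toList.count k : Int) > liczba))
    (PySem.Set.ofList napis.toList) PySem.Set.empty (PySem.Set.nodup_ofList _)
    (by intro c _ h; simp [PySem.Set.empty] at h)

-- ===== VERDICT =====
theorem wiecej_niz_spec : Claim_equal_wiecej_niz := by
  intro napis liczba _
  unfold Spec_wiecej_niz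
  exact pv_main napis liczba
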